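-- pv_equiv track=rewrite | github.com/Ingenium-Games/ingenium | scripts/generate_readme_complete.py | create_missing_docs_report
-- ===== SOURCE A (Python) =====
-- from collections import defaultdict
--
-- def create_missing_docs_report(missing_docs, ignored_count):
--     """Create report of missing documentation"""
--     report_lines = [
--         '📋 MISSING DOCUMENTATION REPORT',
--         '================================',
--         '',
--     ]
--
--     if missing_docs:
--         report_lines.append(f'Functions Without Wiki Files: {len(missing_docs)}')
--         report_lines.append('')
--
--         # Group by namespace
--         by_namespace = defaultdict(list)
--         for doc in missing_docs:
--             by_namespace[doc['namespace']].append(doc)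
--
--         for namespace in sorted(by_namespace.keys()):
--             report_lines.append(f'  {namespace}:')
--             for doc in sorted(by_namespace[namespace], key=lambda x: x['name']):
--                 report_lines.append(f'    - {doc["full_name"]} {doc["scope"]}')
--             report_lines.append('')
--
--     if ignored_count:
--         report_lines.append(f'Functions Ignored (marked @wiki:ignore): {ignored_count}')
--         report_lines.append('')
--
--     report_lines.extend([
--         'ACTIONS TAKEN:',
--         '✅ Functions added to README.md (with placeholders if missing docs)',
--         '⚠️  Missing documentation marked with ⚠️ symbol',
--         '',
--         'NEXT STEPS:',
--         '1. Create .md files for marked functions',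
--         '2. Update README.md entry once documentation is complete',
--         '3. Run verify script to confirm all links',
--         '',
--     ])
--
--     return '\n'.join(report_lines)
-- ===== SOURCE B (Python) =====
-- from itertools import groupby
--
-- def create_missing_docs_report(missing_docs, ignored_count):
--     """Create report of missing documentation"""
--     lines = [
--         '📋 MISSING DOCUMENTATION REPORT',
--         '================================',
--         '',
--     ]
--
--     if missing_docs:
--         lines.append(f'Functions Without Wiki Files: {len(missing_docs)}')
--         lines.append('')
--
--         # One stable sort on (namespace, name), then a single grouped pass:
--         # no dict grouping, no per-namespace sort.
--         ordered = sorted(missing_docs, key=lambda d: (d['namespace'], d['name']))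
--         for namespace, group in groupby(ordered, key=lambda d: d['namespace']):
--             lines.append(f'  {namespace}:')
--             for doc in group:
--                 lines.append(f'    - {doc["full_name"]} {doc["scope"]}')
--             lines.append('')
--
--     if ignored_count:
--         lines.append(f'Functions Ignored (marked @wiki:ignore): {ignored_count}')
--         lines.append('')
--
--     lines.extend([
--         'ACTIONS TAKEN:',
--         '✅ Functions added to README.md (with placeholders if missing docs)',
--         '⚠️  Missing documentation marked with ⚠️ symbol',
--         '',
--         'NEXT STEPS:',
--         '1. Create .md files for marked functions',
--         '2. Update README.md entry once documentation is complete',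
--         '3. Run verify script to confirm all links',
--         '',
--     ])
--
--     return '\n'.join(lines)
-- ===== Notes on version B (the rewrite author's own statement) =====
-- stated objective: alternative
-- what changed: Replaces A's defaultdict grouping plus a per-namespace sort of each bucket by one stable sort of the whole list on the (namespace, name) pair followed by a single itertools.groupby pass that emits each namespace block at its group boundary.
import Mathlib
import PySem

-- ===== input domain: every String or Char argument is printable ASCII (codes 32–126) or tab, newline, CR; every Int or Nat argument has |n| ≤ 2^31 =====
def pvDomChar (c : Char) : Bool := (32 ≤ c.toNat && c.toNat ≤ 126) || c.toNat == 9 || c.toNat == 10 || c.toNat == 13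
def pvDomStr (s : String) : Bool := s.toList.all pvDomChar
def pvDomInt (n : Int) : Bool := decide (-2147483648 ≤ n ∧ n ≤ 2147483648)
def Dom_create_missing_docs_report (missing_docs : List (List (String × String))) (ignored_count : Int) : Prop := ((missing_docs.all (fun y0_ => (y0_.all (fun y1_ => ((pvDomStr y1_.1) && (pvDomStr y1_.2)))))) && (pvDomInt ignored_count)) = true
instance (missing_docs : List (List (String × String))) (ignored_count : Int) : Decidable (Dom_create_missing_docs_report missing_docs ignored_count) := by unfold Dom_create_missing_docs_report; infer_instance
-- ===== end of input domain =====

-- B replaces A's defaultdict grouping + per-namespace sorts by ONE stable sort on the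
-- (namespace, name) pair followed by a single grouped pass (itertools.groupby style).

-- doc['k'] for the admitted inputs (Pre_ guarantees the key is present); dict built Python-style (later pair overwrites)
def pvGet (doc : List (String × String)) (k : String) : String :=
  (PySem.Dict.ofList doc).getD k ""

def pvHeaderLines : List String :=
  ["📋 MISSING DOCUMENTATION REPORT", "================================", ""]

def pvFooterLines : List String :=
  ["ACTIONS TAKEN:",
   "✅ Functions added to README.md (with placeholders if missing docs)",
   "⚠️  Missing documentation marked with ⚠️ symbol",
   "",
   "NEXT STEPS:",
   "1. Create .md files for marked functions",
   "2. Update README.md entry once documentation is complete",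
   "3. Run verify script to confirm all links",
   ""]

-- ===== PORT A =====
def create_missing_docs_report (missing_docs : List (List (String × String))) (ignored_count : Int) : String :=
  let report_lines : List String := pvHeaderLines
  let report_lines :=
    if missing_docs ≠ [] then
      let report_lines := report_lines ++ ["Functions Without Wiki Files: " ++ PySem.Int.toStr (PySem.List.len missing_docs)]
      let report_lines := report_lines ++ [""]
      -- by_namespace = defaultdict(list); for doc: by_namespace[doc['namespace']].append(doc)
      let by_namespace : PySem.Dict String (List (List (String × String))) :=
        missing_docs.foldl (fun d doc => d.modify (pvGet doc "namespace") [] (fun g => g ++ [doc])) PySem.Dict.empty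
      (PySem.List.sorted by_namespace.keys (fun x => x)).foldl
        (fun acc ns =>
          let acc := acc ++ ["  " ++ ns ++ ":"]
          let acc := (PySem.List.sorted (by_namespace.getD ns []) (fun d => pvGet d "name")).foldl
            (fun acc doc => acc ++ ["    - " ++ pvGet doc "full_name" ++ " " ++ pvGet doc "scope"]) acc
          acc ++ [""]) report_lines
    else report_lines
  let report_lines :=
    if ignored_count ≠ 0 then
      (report_lines ++ ["Functions Ignored (marked @wiki:ignore): " ++ PySem.Int.toStr ignored_count]) ++ [""]
    else report_lines
  PySem.Str.join "\n" (report_lines ++ pvFooterLines)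

-- ===== PORT B =====
-- for the termination of the groupby pass: dropWhile drops at least the head it satisfies
theorem pvDropWhile_lt {α : Type} (p : α → Bool) (d : α) (t : List α) (h : p d = true) :
    (List.dropWhile p (d :: t)).length < (d :: t).length := by
  simp only [List.dropWhile_cons, h, if_true]
  exact Nat.lt_succ_of_le (List.length_dropWhile_le p t)

-- one grouped pass over the (namespace, name)-sorted list (itertools.groupby in Source B)
def pvEmitGroups : List (List (String × String)) → List String
  | [] => []
  | d :: t =>
    let ns := pvGet d "namespace"
    ("  " ++ ns ++ ":") ::
      (((d :: t).takeWhile (fun x => pvGet x "namespace" == ns)).map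
          (fun doc => "    - " ++ pvGet doc "full_name" ++ " " ++ pvGet doc "scope") ++ [""]
        ++ pvEmitGroups ((d :: t).dropWhile (fun x => pvGet x "namespace" == ns)))
termination_by l => l.length
decreasing_by exact pvDropWhile_lt _ d t (by simp)

def create_missing_docs_report_alt (missing_docs : List (List (String × String))) (ignored_count : Int) : String :=
  let lines : List String := pvHeaderLines
  let lines :=
    if missing_docs ≠ [] then
      lines ++ ["Functions Without Wiki Files: " ++ PySem.Int.toStr (PySem.List.len missing_docs), ""]
        ++ pvEmitGroups (PySem.List.sorted2 missing_docs (fun d => pvGet d "namespace") (fun d => pvGet d "name"))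
    else lines
  let lines :=
    if ignored_count ≠ 0 then
      lines ++ ["Functions Ignored (marked @wiki:ignore): " ++ PySem.Int.toStr ignored_count, ""]
    else lines
  PySem.Str.join "\n" (lines ++ pvFooterLines)

-- ===== PRECONDITION & SPEC =====
-- Pre_ excludes exactly the inputs on which the Python A raises KeyError: some doc lacks
-- one of the keys 'namespace', 'name', 'full_name', 'scope'.
def Pre_create_missing_docs_report (missing_docs : List (List (String × String))) (ignored_count : Int) : Prop :=
  missing_docs.all (fun doc =>
    (PySem.Dict.ofList doc).contains "namespace" && (PySem.Dict.ofList doc).contains "name" &&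
    (PySem.Dict.ofList doc).contains "full_name" && (PySem.Dict.ofList doc).contains "scope") = true
instance (missing_docs : List (List (String × String))) (ignored_count : Int) : Decidable (Pre_create_missing_docs_report missing_docs ignored_count) := by unfold Pre_create_missing_docs_report; infer_instance

def pvWitness_create_missing_docs_report : (List (List (String × String))) × Int :=
  ([[("namespace", "esx"), ("name", "getJob"), ("full_name", "esx.getJob"), ("scope", "client")]], 2)

def Spec_create_missing_docs_report (missing_docs : List (List (String × String))) (ignored_count : Int) (out : String) : Prop := out = create_missing_docs_report_alt missing_docs ignored_count
instance (missing_docs : List (List (String × String))) (ignored_count : Int) (out : String) : Decidable (Spec_create_missing_docs_report missing_docs ignored_count out) := by unfold Spec_create_missing_docs_report; infer_instance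

-- ===== CLAIM (what is proved, stated in full; the proofs are below) =====
def Claim_equal_create_missing_docs_report : Prop := ∀ (missing_docs : List (List (String × String))) (ignored_count : Int), Dom_create_missing_docs_report missing_docs ignored_count → Pre_create_missing_docs_report missing_docs ignored_count → Spec_create_missing_docs_report missing_docs ignored_count (create_missing_docs_report missing_docs ignored_count)

-- ===== LEMMAS AND PROOFS =====

-- abbreviations for the proofs
def pvNs (d : List (String × String)) : String := pvGet d "namespace"
def pvName (d : List (String × String)) : String := pvGet d "name"
def pvLine (d : List (String × String)) : String := "    - " ++ pvGet d "full_name" ++ " " ++ pvGet d "scope"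
-- the comparison sorted2 uses (lexicographic on (namespace, name))
def pvLt2 (a b : List (String × String)) : Bool :=
  decide (pvNs a < pvNs b) || (!decide (pvNs b < pvNs a) && decide (pvName a < pvName b))
-- the comparison the per-namespace sort uses
def pvLt1 (a b : List (String × String)) : Bool := decide (pvName a < pvName b)
-- "a may stay before b" (non-strict sortedness relation of the insertion sort)
def pvR (a b : List (String × String)) : Prop := pvLt2 b a = false

theorem pvLt2_iff {a b : List (String × String)} :
    pvLt2 a b = true ↔ (pvNs a < pvNs b ∨ (pvNs a ≤ pvNs b ∧ pvName a < pvName b)) := by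
  simp only [pvLt2, Bool.or_eq_true, Bool.and_eq_true, Bool.not_eq_true', decide_eq_true_eq,
    decide_eq_false_iff_not, not_lt]

theorem pvLt2_asymm {a b : List (String × String)} (h : pvLt2 a b = true) : pvLt2 b a = false := by
  rw [Bool.eq_false_iff]
  intro h2
  rw [pvLt2_iff] at h h2
  rcases h with h | ⟨h1, h2'⟩ <;> rcases h2 with g | ⟨g1, g2⟩
  · exact absurd h (not_lt.mpr g.le)
  · exact absurd h (not_lt.mpr g1)
  · exact absurd g (not_lt.mpr h1)
  · exact absurd h2' (not_lt.mpr g2.le)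

theorem pvLt2_trans {a b c : List (String × String)} (h1 : pvLt2 a b = true) (h2 : pvLt2 b c = true) : pvLt2 a c = true := by
  rw [pvLt2_iff] at *
  rcases h1 with h | ⟨h1, h1'⟩ <;> rcases h2 with g | ⟨g1, g1'⟩
  · exact Or.inl (lt_trans h g)
  · exact Or.inl (lt_of_lt_of_le h g1)
  · exact Or.inl (lt_of_le_of_lt h1 g)
  · exact Or.inr ⟨le_trans h1 g1, lt_trans h1' g1'⟩

theorem pvR_ns_le {a b : List (String × String)} (h : pvR a b) : pvNs a ≤ pvNs b := by
  unfold pvR pvLt2 at h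
  simp only [Bool.or_eq_false_iff, decide_eq_false_iff_not, not_lt] at h
  exact h.1

theorem pvInsertBy_pairwise (x : List (String × String)) {ys : List (List (String × String))}
    (h : ys.Pairwise pvR) : (PySem.List.insertBy pvLt2 x ys).Pairwise pvR := by
  induction ys with
  | nil => simp [PySem.List.insertBy]
  | cons y t ih =>
    rw [List.pairwise_cons] at h
    obtain ⟨hy, ht⟩ := h
    by_cases hxy : pvLt2 x y = true
    · rw [show PySem.List.insertBy pvLt2 x (y :: t) = x :: y :: t by simp [PySem.List.insertBy, hxy]]
      refine List.Pairwise.cons ?_ (List.Pairwise.cons hy ht)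
      intro z hz
      rcases List.mem_cons.mp hz with rfl | hz
      · exact pvLt2_asymm hxy
      · -- pvR x z : pvLt2 z x = false
        unfold pvR
        rw [Bool.eq_false_iff]
        intro hzx
        have h0 : pvR y z := hy z hz
        unfold pvR at h0
        rw [pvLt2_trans hzx hxy] at h0
        cases h0
    · rw [show PySem.List.insertBy pvLt2 x (y :: t) = y :: PySem.List.insertBy pvLt2 x t by
        simp [PySem.List.insertBy, hxy]]
      refine List.Pairwise.cons ?_ (ih ht)
      intro z hz
      rcases (PySem.List.mem_insertBy pvLt2 x z t).mp hz with rfl | hz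
      · exact Bool.eq_false_iff.mpr hxy
      · exact hy z hz

theorem pvFoldl_pairwise (xs : List (List (String × String))) (acc : List (List (String × String)))
    (h : acc.Pairwise pvR) :
    (xs.foldl (fun a x => PySem.List.insertBy pvLt2 x a) acc).Pairwise pvR := by
  induction xs generalizing acc with
  | nil => exact h
  | cons x t ih => exact ih _ (pvInsertBy_pairwise x h)

theorem pvLt2_eq_lt1 {x y : List (String × String)} (h : pvNs x = pvNs y) : pvLt2 x y = pvLt1 x y := by
  unfold pvLt2 pvLt1
  rw [h]
  simp

theorem pvNs_lt_of_lt2 {c : String} {x y : List (String × String)} (hx : pvNs x = c)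
    (hy : pvNs y ≠ c) (h : pvLt2 x y = true) : c < pvNs y := by
  rw [pvLt2_iff, hx] at h
  rcases h with h | ⟨h1, _⟩
  · exact h
  · exact lt_of_le_of_ne h1 (Ne.symm hy)

theorem pvFilter_insertBy (c : String) (x : List (String × String)) (ys : List (List (String × String)))
    (h : ys.Pairwise pvR) :
    (PySem.List.insertBy pvLt2 x ys).filter (fun d => pvNs d == c) =
      if pvNs x == c then PySem.List.insertBy pvLt1 x (ys.filter (fun d => pvNs d == c))
      else ys.filter (fun d => pvNs d == c) := by
  induction ys with
  | nil =>
    by_cases hx : pvNs x == c <;> simp [PySem.List.insertBy, List.filter_cons, hx]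
  | cons y t ih =>
    rw [List.pairwise_cons] at h
    obtain ⟨hy, ht⟩ := h
    by_cases hxy : pvLt2 x y = true
    · rw [show PySem.List.insertBy pvLt2 x (y :: t) = x :: y :: t by simp [PySem.List.insertBy, hxy]]
      by_cases hx : pvNs x = c
      · rw [if_pos (beq_iff_eq.mpr hx)]
        by_cases hyc : pvNs y = c
        · have h1 : pvLt1 x y = true := by rw [← pvLt2_eq_lt1 (hx.trans hyc.symm)]; exact hxy
          simp [List.filter_cons, hx, hyc, PySem.List.insertBy, h1]
        · have hlt : c < pvNs y := pvNs_lt_of_lt2 hx hyc hxy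
          have hnil : (y :: t).filter (fun d => pvNs d == c) = [] := by
            rw [List.filter_eq_nil_iff]
            intro z hz
            rcases List.mem_cons.mp hz with rfl | hz
            · simp [beq_iff_eq, hyc]
            · have : pvNs y ≤ pvNs z := pvR_ns_le (hy z hz)
              simp only [beq_iff_eq]
              intro hc
              rw [hc] at this
              exact absurd (lt_of_lt_of_le hlt this) (lt_irrefl c)
          rw [show ((x :: y :: t).filter (fun d => pvNs d == c)) = x :: ((y :: t).filter (fun d => pvNs d == c)) by
            simp [List.filter_cons, beq_iff_eq, hx]]
          rw [hnil]
          simp [PySem.List.insertBy]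
      · rw [if_neg (by simpa [beq_iff_eq] using hx)]
        simp [List.filter_cons, beq_iff_eq, hx]
    · rw [show PySem.List.insertBy pvLt2 x (y :: t) = y :: PySem.List.insertBy pvLt2 x t by
        simp [PySem.List.insertBy, hxy]]
      by_cases hx : pvNs x = c
      · rw [if_pos (beq_iff_eq.mpr hx)]
        have ihx := ih ht
        rw [if_pos (beq_iff_eq.mpr hx)] at ihx
        by_cases hyc : pvNs y = c
        · have h1 : pvLt1 x y = false := by rw [← pvLt2_eq_lt1 (hx.trans hyc.symm)]; exact Bool.eq_false_iff.mpr hxy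
          have hf : (y :: t).filter (fun d => pvNs d == c) = y :: t.filter (fun d => pvNs d == c) := by
            simp [List.filter_cons, hyc]
          rw [hf, show PySem.List.insertBy pvLt1 x (y :: t.filter (fun d => pvNs d == c)) =
              y :: PySem.List.insertBy pvLt1 x (t.filter (fun d => pvNs d == c)) by
            simp [PySem.List.insertBy, h1]]
          simp [hyc, ihx]
        · simp [hyc, ihx]
      · rw [if_neg (by simpa [beq_iff_eq] using hx)]
        have ihx := ih ht
        rw [if_neg (by simpa [beq_iff_eq] using hx)] at ihx
        simp [List.filter_cons, ihx]

theorem pvFilter_foldl (c : String) (xs acc : List (List (String × String))) (h : acc.Pairwise pvR) :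
    (xs.foldl (fun a x => PySem.List.insertBy pvLt2 x a) acc).filter (fun d => pvNs d == c) =
      (xs.filter (fun d => pvNs d == c)).foldl (fun a x => PySem.List.insertBy pvLt1 x a)
        (acc.filter (fun d => pvNs d == c)) := by
  induction xs generalizing acc with
  | nil => rfl
  | cons x t ih =>
    rw [List.foldl_cons, ih _ (pvInsertBy_pairwise x h), pvFilter_insertBy c x acc h, List.filter_cons]
    by_cases hx : pvNs x = c
    · rw [if_pos (beq_iff_eq.mpr hx), if_pos (by simp [hx]), List.foldl_cons]
    · rw [if_neg (by simpa [beq_iff_eq] using hx), if_neg (by simpa [beq_iff_eq] using hx)]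

theorem pvSorted2_eq_foldl (xs : List (List (String × String))) :
    PySem.List.sorted2 xs (fun d => pvGet d "namespace") (fun d => pvGet d "name") =
      xs.foldl (fun a x => PySem.List.insertBy pvLt2 x a) [] := rfl

theorem pvSorted2_pairwise (xs : List (List (String × String))) :
    (PySem.List.sorted2 xs (fun d => pvGet d "namespace") (fun d => pvGet d "name")).Pairwise pvR := by
  rw [pvSorted2_eq_foldl]; exact pvFoldl_pairwise xs [] (by simp)

theorem pvFilter_sorted2 (c : String) (xs : List (List (String × String))) :
    (PySem.List.sorted2 xs (fun d => pvGet d "namespace") (fun d => pvGet d "name")).filter (fun d => pvNs d == c) =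
      PySem.List.sorted (xs.filter (fun d => pvNs d == c)) (fun d => pvGet d "name") := by
  rw [pvSorted2_eq_foldl, pvFilter_foldl c xs [] (by simp),
    PySem.List.sorted_eq_foldl_insertBy]
  rfl

theorem pvFlatMap_congr {α β : Type} {l : List α} {f g : α → List β}
    (h : ∀ x ∈ l, f x = g x) : l.flatMap f = l.flatMap g := by
  induction l with
  | nil => rfl
  | cons a t ih => simp only [List.flatMap_cons, h a (by simp), ih fun x hx => h x (List.mem_cons_of_mem a hx)]

-- elements left after the leading namespace group have a strictly larger namespace
theorem pvDropWhile_gt (l : List (List (String × String))) (c0 : String) (h : l.Pairwise pvR)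
    (hle : ∀ z ∈ l, c0 ≤ pvNs z) :
    ∀ z ∈ l.dropWhile (fun x => pvNs x == c0), c0 < pvNs z := by
  induction l with
  | nil => simp
  | cons a l ih =>
    rw [List.pairwise_cons] at h
    by_cases ha : pvNs a == c0
    · rw [show List.dropWhile (fun x => pvNs x == c0) (a :: l) = List.dropWhile (fun x => pvNs x == c0) l by
        simp only [List.dropWhile_cons, ha, if_true]]
      exact ih h.2 (fun z hz => hle z (List.mem_cons_of_mem a hz))
    · rw [show List.dropWhile (fun x => pvNs x == c0) (a :: l) = a :: l by
        simp only [List.dropWhile_cons, ha, if_false, Bool.false_eq_true]]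
      have ha' : c0 < pvNs a :=
        lt_of_le_of_ne (hle a (by simp)) (fun hc => ha (by simp [hc.symm]))
      intro z hz
      rcases List.mem_cons.mp hz with rfl | hz
      · exact ha'
      · exact lt_of_lt_of_le ha' (pvR_ns_le (h.1 z hz))

-- the grouped single pass over a (namespace,name)-sorted list equals the flatMap over sorted distinct namespaces
theorem pvEmit_eq (s : List (List (String × String))) (h : s.Pairwise pvR) :
    pvEmitGroups s =
      (PySem.List.sorted (PySem.Set.ofList (s.map pvNs)) (fun x => x)).flatMap
        (fun c => ("  " ++ c ++ ":") :: ((s.filter (fun d => pvNs d == c)).map pvLine ++ [""])) := by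
  induction s using pvEmitGroups.induct with
  | case1 => simp [pvEmitGroups]
  | case2 d t ns ih =>
    generalize hs : (d :: t) = s at *
    have hd : d ∈ s := hs ▸ List.mem_cons_self
    have hns : ns = pvNs d := rfl
    have hp : (fun x => pvGet x "namespace" == ns) = (fun x => pvNs x == pvNs d) := rfl
    rw [hp] at ih
    have hdt : (d :: t).Pairwise pvR := by rw [hs]; exact h
    have hle : ∀ z ∈ s, pvNs d ≤ pvNs z := by
      intro z hz
      rw [← hs] at hz
      rcases List.mem_cons.mp hz with rfl | hz
      · exact le_refl _
      · exact pvR_ns_le ((List.pairwise_cons.mp hdt).1 z hz)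
    have hgt : ∀ z ∈ s.dropWhile (fun x => pvNs x == pvNs d), pvNs d < pvNs z :=
      pvDropWhile_gt s (pvNs d) h hle
    have hrest : (s.dropWhile (fun x => pvNs x == pvNs d)).Pairwise pvR :=
      List.Pairwise.sublist (List.dropWhile_sublist _) h
    -- leading group = the filter at namespace (pvNs d)
    have hfilter0 : s.filter (fun x => pvNs x == pvNs d) = s.takeWhile (fun x => pvNs x == pvNs d) := by
      conv_lhs => rw [← List.takeWhile_append_dropWhile (p := fun x => pvNs x == pvNs d) (l := s)]
      rw [List.filter_append,
        List.filter_eq_self.mpr (fun a ha => List.mem_takeWhile_imp (p := fun x => pvNs x == pvNs d) ha),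
        List.filter_eq_nil_iff.mpr (fun a ha hc => absurd ((beq_iff_eq.mp hc) ▸ hgt a ha) (lt_irrefl _)),
        List.append_nil]
    -- later namespaces: the filter ignores the leading group
    have hfilter_rest : ∀ c, pvNs d < c →
        s.filter (fun x => pvNs x == c) = (s.dropWhile (fun x => pvNs x == pvNs d)).filter (fun x => pvNs x == c) := by
      intro c hc
      conv_lhs => rw [← List.takeWhile_append_dropWhile (p := fun x => pvNs x == pvNs d) (l := s)]
      rw [List.filter_append, List.filter_eq_nil_iff.mpr, List.nil_append]
      intro a ha hca
      have : pvNs a = pvNs d := beq_iff_eq.mp (List.mem_takeWhile_imp (p := fun x => pvNs x == pvNs d) ha)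
      rw [beq_iff_eq.mp hca] at this
      exact absurd (this ▸ hc) (lt_irrefl _)
    -- the sorted distinct namespaces of s = (pvNs d) :: those of the rest
    have hset : PySem.List.sorted (PySem.Set.ofList (s.map pvNs)) (fun x => x) =
        pvNs d :: PySem.List.sorted (PySem.Set.ofList ((s.dropWhile (fun x => pvNs x == pvNs d)).map pvNs)) (fun x => x) := by
      apply PySem.List.sorted_eq_of_perm_of_pairwise_lt
      · have hmemtail : ∀ a, a ∈ PySem.List.sorted (PySem.Set.ofList ((s.dropWhile (fun x => pvNs x == pvNs d)).map pvNs)) (fun x => x) ↔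
            a ∈ (s.dropWhile (fun x => pvNs x == pvNs d)).map pvNs := by
          intro a; rw [PySem.List.mem_sorted, PySem.Set.mem_ofList]
        rw [List.perm_ext_iff_of_nodup, ]
        · intro a
          simp only [List.mem_cons, hmemtail, PySem.Set.mem_ofList, List.mem_map]
          constructor
          · rintro (rfl | ⟨z, hz, rfl⟩)
            · exact ⟨d, hd, rfl⟩
            · exact ⟨z, (List.dropWhile_sublist _).mem hz, rfl⟩
          · rintro ⟨z, hz, rfl⟩
            rw [← hs] at hz ⊢
            rw [← List.takeWhile_append_dropWhile (p := fun x => pvNs x == pvNs d) (l := d :: t)] at hz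
            rcases List.mem_append.mp hz with hz | hz
            · exact Or.inl (beq_iff_eq.mp (List.mem_takeWhile_imp (p := fun x => pvNs x == pvNs d) hz))
            · exact Or.inr ⟨z, hs ▸ hz, rfl⟩
        · refine List.nodup_cons.mpr ⟨?_, (List.Perm.nodup (PySem.List.sorted_perm _ _ _).symm (PySem.Set.nodup_ofList _))⟩
          intro hmem
          rcases List.mem_map.mp ((hmemtail _).mp hmem) with ⟨z, hz, hzz⟩
          exact absurd (hzz ▸ hgt z hz) (lt_irrefl _)
        · exact PySem.Set.nodup_ofList _
      · refine List.pairwise_cons.mpr ⟨?_, PySem.List.sorted_ofList_pairwise_lt _⟩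
        intro a ha
        rcases List.mem_map.mp (PySem.Set.mem_ofList _ _ |>.mp ((PySem.List.mem_sorted _ _ _ _).mp ha)) with ⟨z, hz, rfl⟩
        exact hgt z hz
    rw [hset, List.flatMap_cons]
    have hcongr : (PySem.List.sorted (PySem.Set.ofList ((s.dropWhile (fun x => pvNs x == pvNs d)).map pvNs)) (fun x => x)).flatMap
          (fun c => ("  " ++ c ++ ":") :: ((s.filter (fun x => pvNs x == c)).map pvLine ++ [""])) =
        (PySem.List.sorted (PySem.Set.ofList ((s.dropWhile (fun x => pvNs x == pvNs d)).map pvNs)) (fun x => x)).flatMap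
          (fun c => ("  " ++ c ++ ":") :: (((s.dropWhile (fun x => pvNs x == pvNs d)).filter (fun x => pvNs x == c)).map pvLine ++ [""])) := by
      apply pvFlatMap_congr
      intro c hc
      rcases List.mem_map.mp (PySem.Set.mem_ofList _ _ |>.mp ((PySem.List.mem_sorted _ _ _ _).mp hc)) with ⟨z, hz, rfl⟩
      rw [hfilter_rest (pvNs z) (hgt z hz)]
    rw [hcongr, ← ih hrest, ← hs]
    rw [← hs] at hfilter0
    simp only [pvEmitGroups, show (fun x => pvGet x "namespace" == pvGet d "namespace") = (fun x => pvNs x == pvNs d) from rfl, hfilter0]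
    simp [pvNs]
    exact ⟨rfl, fun a _ => rfl⟩

-- A's middle block, rewritten to the flatMap normal form
theorem pvA_middle (mds : List (List (String × String))) (base : List String) :
    (PySem.List.sorted
        (mds.foldl (fun d doc => d.modify (pvGet doc "namespace") [] (fun g => g ++ [doc]))
            (PySem.Dict.empty : PySem.Dict String (List (List (String × String))))).keys (fun x => x)).foldl
      (fun acc ns =>
        let acc := acc ++ ["  " ++ ns ++ ":"]
        let acc := (PySem.List.sorted
            ((mds.foldl (fun d doc => d.modify (pvGet doc "namespace") [] (fun g => g ++ [doc]))
              (PySem.Dict.empty : PySem.Dict String (List (List (String × String))))).getD ns [])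
            (fun d => pvGet d "name")).foldl
          (fun acc doc => acc ++ ["    - " ++ pvGet doc "full_name" ++ " " ++ pvGet doc "scope"]) acc
        acc ++ [""]) base =
    base ++ (PySem.List.sorted (PySem.Set.ofList (mds.map pvNs)) (fun x => x)).flatMap
      (fun c => ("  " ++ c ++ ":") :: ((PySem.List.sorted (mds.filter (fun d => pvNs d == c)) (fun d => pvGet d "name")).map pvLine ++ [""])) := by
  have hdict : mds.foldl (fun d doc => d.modify (pvGet doc "namespace") [] (fun g => g ++ [doc]))
      (PySem.Dict.empty : PySem.Dict String (List (List (String × String)))) =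
      (mds.map (fun doc => (pvGet doc "namespace", doc))).foldl
        (fun d p => d.modify p.1 [] (fun g => g ++ [p.2]))
        (PySem.Dict.empty : PySem.Dict String (List (List (String × String)))) := by
    rw [List.foldl_map]
  have hkeys : (mds.foldl (fun d doc => d.modify (pvGet doc "namespace") [] (fun g => g ++ [doc]))
      (PySem.Dict.empty : PySem.Dict String (List (List (String × String))))).keys =
      PySem.Set.ofList (mds.map pvNs) := by
    rw [PySem.Dict.keys_foldl_modify_key mds (fun doc => pvGet doc "namespace") []
      (fun _ doc => fun g => g ++ [doc])]
    rw [show (PySem.Dict.empty : PySem.Dict String (List (List (String × String)))).keys = [] from rfl,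
      PySem.Set.update_nil_left]
    rfl
  have hgetD : ∀ c, (mds.foldl (fun d doc => d.modify (pvGet doc "namespace") [] (fun g => g ++ [doc]))
      (PySem.Dict.empty : PySem.Dict String (List (List (String × String))))).getD c [] =
      mds.filter (fun d => pvNs d == c) := by
    intro c
    rw [hdict, PySem.Dict.getD_foldl_modify_append]
    rw [show (PySem.Dict.empty : PySem.Dict String (List (List (String × String)))).getD c [] = [] from rfl,
      List.nil_append, List.filter_map, List.map_map]
    simp [Function.comp_def, pvNs]
  simp only [hkeys, hgetD]
  -- collapse the two appending loops into one flatMap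
  have hinner : ∀ (g : List (List (String × String))) (acc : List String),
      g.foldl (fun acc doc => acc ++ ["    - " ++ pvGet doc "full_name" ++ " " ++ pvGet doc "scope"]) acc =
        acc ++ g.map pvLine := by
    intro g acc
    exact PySem.List.foldl_append_singleton_eq_map pvLine g acc
  have houter : (PySem.List.sorted (PySem.Set.ofList (mds.map pvNs)) (fun x => x)).foldl
      (fun acc ns =>
        let acc := acc ++ ["  " ++ ns ++ ":"]
        let acc := (PySem.List.sorted (mds.filter (fun d => pvNs d == ns)) (fun d => pvGet d "name")).foldl
          (fun acc doc => acc ++ ["    - " ++ pvGet doc "full_name" ++ " " ++ pvGet doc "scope"]) acc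
        acc ++ [""]) base =
      (PySem.List.sorted (PySem.Set.ofList (mds.map pvNs)) (fun x => x)).foldl
      (fun acc c => acc ++ (("  " ++ c ++ ":") ::
        ((PySem.List.sorted (mds.filter (fun d => pvNs d == c)) (fun d => pvGet d "name")).map pvLine ++ [""]))) base := by
    apply PySem.List.foldl_congr_mem
    intro acc c _
    simp only []
    rw [hinner]
    simp [List.append_assoc]
  rw [houter, PySem.List.foldl_append_eq_flatMap]

theorem pvMiddle_eq (mds : List (List (String × String))) :
    pvEmitGroups (PySem.List.sorted2 mds (fun d => pvGet d "namespace") (fun d => pvGet d "name")) =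
      (PySem.List.sorted (PySem.Set.ofList (mds.map pvNs)) (fun x => x)).flatMap
        (fun c => ("  " ++ c ++ ":") :: ((PySem.List.sorted (mds.filter (fun d => pvNs d == c)) (fun d => pvGet d "name")).map pvLine ++ [""])) := by
  rw [pvEmit_eq _ (pvSorted2_pairwise mds)]
  have hperm : (PySem.Set.ofList ((PySem.List.sorted2 mds (fun d => pvGet d "namespace") (fun d => pvGet d "name")).map pvNs)).Perm
      (PySem.Set.ofList (mds.map pvNs)) := by
    rw [List.perm_ext_iff_of_nodup (PySem.Set.nodup_ofList _) (PySem.Set.nodup_ofList _)]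
    intro a
    simp only [PySem.Set.mem_ofList, List.mem_map]
    constructor
    · rintro ⟨z, hz, rfl⟩
      exact ⟨z, (PySem.List.sorted2_perm mds _ _ false).mem_iff.mp hz, rfl⟩
    · rintro ⟨z, hz, rfl⟩
      exact ⟨z, (PySem.List.sorted2_perm mds _ _ false).mem_iff.mpr hz, rfl⟩
  rw [PySem.List.sorted_eq_sorted_of_perm _ _ (fun x => x) (fun a b h => h) hperm]
  apply pvFlatMap_congr
  intro c _
  rw [pvFilter_sorted2 c mds]

-- ===== VERDICT (by name: the statement is the Claim_ definition above) =====
theorem create_missing_docs_report_spec : Claim_equal_create_missing_docs_report := by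
  intro mds ic _ _
  unfold Spec_create_missing_docs_report create_missing_docs_report create_missing_docs_report_alt
  by_cases hm : mds = [] <;> simp only [hm, if_true, if_false, ne_eq, not_true_eq_false, not_false_eq_true]
  · rfl
  · congr 1
    rw [pvMiddle_eq mds, ← pvA_middle mds]
    by_cases hic : ic = 0 <;> simp [hic, List.append_assoc]
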